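-- pv_equiv track=rewrite | github.com/amol-ship-it/agi-core | domains/arc/transformation_primitives.py | extend_down
-- ===== SOURCE A (Python) =====
-- Grid = list[list[int]]
--
-- def extend_down(grid: Grid) -> Grid:
--     """Each non-zero pixel extends downward until hitting another non-zero.
--
--     Justified by task d037b0a7.
--     """
--     if not grid or not grid[0]:
--         return grid
--     h, w = len(grid), len(grid[0])
--     result = [row[:] for row in grid]
--     for r in range(h):
--         for c in range(w):
--             if grid[r][c] == 0:
--                 continue
--             nr = r + 1
--             while nr < h and grid[nr][c] == 0:
--                 result[nr][c] = grid[r][c]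
--                 nr += 1
--     return result
-- ===== SOURCE B (Python) =====
-- Grid = list[list[int]]
--
-- def extend_down(grid: Grid) -> Grid:
--     """Single top-down pass: per column, carry the last non-zero value and fill zeros with it."""
--     if not grid or not grid[0]:
--         return grid
--     w = len(grid[0])
--     last = [0] * w
--     result = []
--     for row in grid:
--         new = row[:]
--         for c in range(w):
--             if new[c] != 0:
--                 last[c] = new[c]
--             elif last[c] != 0:
--                 new[c] = last[c]
--         result.append(new)
--     return result
-- ===== Notes on version B (the rewrite author's own statement) =====
-- stated objective: simpler
-- what changed: A's per-pixel inner while-loop that pushes each non-zero value downward is replaced by a single top-down pass that carries, per column, the last non-zero value seen and fills zeros with it; Pre_ excludes ragged grids with a row shorter than row 0, on which both programs raise IndexError.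
import Mathlib
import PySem

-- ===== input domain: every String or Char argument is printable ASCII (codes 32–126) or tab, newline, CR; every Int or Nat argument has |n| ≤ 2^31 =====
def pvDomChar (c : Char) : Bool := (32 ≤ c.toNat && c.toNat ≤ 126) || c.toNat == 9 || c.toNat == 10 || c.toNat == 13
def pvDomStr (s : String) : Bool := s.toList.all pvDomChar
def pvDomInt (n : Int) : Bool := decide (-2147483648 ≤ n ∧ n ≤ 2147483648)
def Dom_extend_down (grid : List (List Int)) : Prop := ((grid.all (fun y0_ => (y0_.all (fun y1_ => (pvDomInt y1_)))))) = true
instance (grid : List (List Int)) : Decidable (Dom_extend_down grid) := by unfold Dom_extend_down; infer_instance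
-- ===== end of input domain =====

-- B replaces A's per-pixel downward while-loop with one top-down pass carrying, per column,
-- the last non-zero value seen ("simpler" decomposition); return values proved equal on Pre_.

-- ===== PORT A =====
-- grid[r][c]: under Pre_ every index A reads is in range, where getD coincides with Python indexing
def pvGet2 (g : List (List Int)) (r c : Nat) : Int := (g.getD r []).getD c 0
-- result[r][c] = v
def pvSet2 (m : List (List Int)) (r c : Nat) (v : Int) : List (List Int) :=
  m.modify r (fun row => row.set c v)
-- the inner 'while nr < h and grid[nr][c] == 0' loop of A
def pvWhile (g : List (List Int)) (hh c : Nat) (v : Int) (res : List (List Int)) (nr : Nat) :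
    List (List Int) :=
  if _h : nr < hh then
    if pvGet2 g nr c = 0 then pvWhile g hh c v (pvSet2 res nr c v) (nr + 1) else res
  else res
termination_by hh - nr

def extend_down (grid : List (List Int)) : List (List Int) :=
  if grid = [] ∨ grid.headI = [] then grid
  else
    let hh := grid.length
    let w := grid.headI.length
    (List.range hh).foldl (fun res r =>
      (List.range w).foldl (fun res c =>
        if pvGet2 grid r c = 0 then res
        else pvWhile grid hh c (pvGet2 grid r c) res (r + 1)) res) grid

-- ===== PORT B =====
-- inner 'for c in range(w)' body: if new[c] != 0: last[c] = new[c] elif last[c] != 0: new[c] = last[c]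
def pvRowStep (st : List Int × List Int) (c : Nat) : List Int × List Int :=
  if st.2.getD c 0 ≠ 0 then (st.1.set c (st.2.getD c 0), st.2)
  else if st.1.getD c 0 ≠ 0 then (st.1, st.2.set c (st.1.getD c 0))
  else st

-- one row of the outer loop: new = row[:]; the inner loop; result.append(new)
def pvStep (w : Nat) (st : List Int × List (List Int)) (row : List Int) :
    List Int × List (List Int) :=
  let p := (List.range w).foldl pvRowStep (st.1, row)
  (p.1, st.2 ++ [p.2])

def extend_down_alt (grid : List (List Int)) : List (List Int) :=
  if grid = [] ∨ grid.headI = [] then grid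
  else
    let w := grid.headI.length
    (grid.foldl (pvStep w) (List.replicate w (0 : Int), [])).2

-- ===== PRECONDITION & SPEC =====
-- Pre_ excludes exactly the ragged grids with a row shorter than the first row, on which both
-- programs raise IndexError (A indexes every row up to len(grid[0]), B writes new[c] for c < w).
def Pre_extend_down (grid : List (List Int)) : Prop :=
  ∀ row ∈ grid, grid.headI.length ≤ row.length
instance (grid : List (List Int)) : Decidable (Pre_extend_down grid) := by
  unfold Pre_extend_down; infer_instance
def pvWitness_extend_down : List (List Int) := [[1, 0], [0, 0], [0, 2]]

def Spec_extend_down (grid : List (List Int)) (out : List (List Int)) : Prop :=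
  out = extend_down_alt grid
instance (grid : List (List Int)) (out : List (List Int)) : Decidable (Spec_extend_down grid out) := by
  unfold Spec_extend_down; infer_instance

-- ===== CLAIM (what is proved, stated in full; the proofs are below) =====
def Claim_equal_extend_down : Prop := ∀ (grid : List (List Int)), Dom_extend_down grid →
  Pre_extend_down grid → Spec_extend_down grid (extend_down grid)

-- ===== LEMMAS AND PROOFS =====

-- last non-zero entry of column c (0 if none)
def colLast (g : List (List Int)) (c : Nat) : Int :=
  g.foldl (fun a row => if row.getD c 0 ≠ 0 then row.getD c 0 else a) 0

def lastList (g : List (List Int)) (w : Nat) : List Int := (List.range w).map (colLast g)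

def expRow (pre : List (List Int)) (w : Nat) (row : List Int) : List Int :=
  List.zipWith (fun v l => if v ≠ 0 then v else l) row (lastList pre w) ++ row.drop w

def expOut (pre : List (List Int)) (w : Nat) : List (List Int) → List (List Int)
  | [] => []
  | row :: t => expRow pre w row :: expOut (pre ++ [row]) w t

-- column c entries of g are all zero on [a,b)
def noz (g : List (List Int)) (c a b : Nat) : Prop :=
  ∀ y, a ≤ y → y < b → pvGet2 g y c = 0

def Fill (g : List (List Int)) (k x cc : Nat) : Prop :=
  ∃ r, r < k ∧ r < x ∧ pvGet2 g r cc ≠ 0 ∧ noz g cc (r + 1) (x + 1)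

def Shape (g res : List (List Int)) : Prop :=
  res.length = g.length ∧ ∀ x, (res.getD x []).length = (g.getD x []).length

theorem pvGet2_default (g : List (List Int)) (x cc : Nat) (hx : g.length ≤ x) :
    pvGet2 g x cc = 0 := by
  simp [pvGet2, List.getD, List.getElem?_eq_none hx]

theorem colLast_append_single (pre : List (List Int)) (row : List Int) (c : Nat) :
    colLast (pre ++ [row]) c = if row.getD c 0 ≠ 0 then row.getD c 0 else colLast pre c := by
  simp [colLast, List.foldl_append]

theorem lastList_nil (w : Nat) : lastList [] w = List.replicate w (0 : Int) := by
  simp [lastList, show colLast [] = fun _ : Nat => (0 : Int) from rfl]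

theorem colLast_take_succ (g : List (List Int)) (c x : Nat) :
    colLast (g.take (x + 1)) c =
      if pvGet2 g x c ≠ 0 then pvGet2 g x c else colLast (g.take x) c := by
  by_cases hx : x < g.length
  · rw [List.take_succ]
    rw [List.getElem?_eq_getElem hx]
    rw [show (some g[x]).toList = [g[x]] from rfl]
    rw [colLast_append_single]
    have hg : pvGet2 g x c = g[x].getD c 0 := by
      simp [pvGet2, List.getD, List.getElem?_eq_getElem hx]
    rw [hg]
  · have h1 : g.take (x + 1) = g := List.take_of_length_le (by omega)
    have h2 : g.take x = g := List.take_of_length_le (by omega)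
    have h3 : pvGet2 g x c = 0 := pvGet2_default g x c (by omega)
    simp [h1, h2, h3]

theorem colLast_eq (g : List (List Int)) (c r x : Nat) (hrx : r < x)
    (hz : noz g c (r + 1) x) :
    colLast (g.take x) c = if pvGet2 g r c ≠ 0 then pvGet2 g r c else colLast (g.take r) c := by
  induction x with
  | zero => omega
  | succ n ih =>
    by_cases hrn : r = n
    · subst hrn; exact colLast_take_succ g c r
    · have hlt : r < n := by omega
      have hz' : pvGet2 g n c = 0 := hz n (by omega) (by omega)
      rw [colLast_take_succ, if_neg (by simpa using hz')]
      exact ih hlt (fun y h1 h2 => hz y h1 (by omega))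

theorem colLast_spec (g : List (List Int)) (c x : Nat) :
    (colLast (g.take x) c = 0 ∧ noz g c 0 x) ∨
    (∃ r, r < x ∧ pvGet2 g r c ≠ 0 ∧ noz g c (r + 1) x ∧ colLast (g.take x) c = pvGet2 g r c) := by
  induction x with
  | zero => exact Or.inl ⟨rfl, fun y h1 h2 => by omega⟩
  | succ n ih =>
    by_cases hn : pvGet2 g n c = 0
    · rcases ih with ⟨h0, hz⟩ | ⟨r, hr, hne, hz, he⟩
      · refine Or.inl ⟨?_, fun y h1 h2 => ?_⟩
        · rw [colLast_take_succ, if_neg (by simpa using hn)]; exact h0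
        · by_cases hyn : y = n
          · subst hyn; exact hn
          · exact hz y h1 (by omega)
      · refine Or.inr ⟨r, by omega, hne, fun y h1 h2 => ?_, ?_⟩
        · by_cases hyn : y = n
          · subst hyn; exact hn
          · exact hz y h1 (by omega)
        · rw [colLast_take_succ, if_neg (by simpa using hn)]; exact he
    · refine Or.inr ⟨n, by omega, hn, fun y h1 h2 => by omega, ?_⟩
      rw [colLast_take_succ, if_pos hn]

-- ----- B side -----

theorem set_getD (l : List Int) (c : Nat) (v : Int) (x : Nat) (hc : c < l.length) :
    (l.set c v).getD x 0 = if x = c then v else l.getD x 0 := by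
  by_cases hxc : x = c
  · subst hxc
    simp [List.getD, List.getElem?_set, hc]
  · simp [List.getD, List.getElem?_set, Ne.symm hxc, hxc]

theorem lastList_getD (pre : List (List Int)) (w c : Nat) (hc : c < w) :
    (lastList pre w).getD c 0 = colLast pre c := by
  rw [lastList, List.getD_eq_getElem _ _ (by simpa using hc)]
  simp

theorem innerB (w : Nat) (last0 row : List Int) (hL : last0.length = w)
    (hR : w ≤ row.length) :
    ∀ j, j ≤ w →
      ((List.range j).foldl pvRowStep (last0, row)).1.length = last0.length ∧
      ((List.range j).foldl pvRowStep (last0, row)).2.length = row.length ∧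
      (∀ c, ((List.range j).foldl pvRowStep (last0, row)).1.getD c 0 =
        if c < j ∧ row.getD c 0 ≠ 0 then row.getD c 0 else last0.getD c 0) ∧
      (∀ c, ((List.range j).foldl pvRowStep (last0, row)).2.getD c 0 =
        if c < j ∧ row.getD c 0 = 0 then last0.getD c 0 else row.getD c 0) := by
  intro j
  induction j with
  | zero =>
    intro _
    refine ⟨rfl, rfl, fun c => ?_, fun c => ?_⟩ <;> simp
  | succ j ih =>
    intro hj
    obtain ⟨h1, h2, h3, h4⟩ := ih (by omega)
    rw [List.range_succ, List.foldl_append, List.foldl_cons, List.foldl_nil]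
    set st := (List.range j).foldl pvRowStep (last0, row) with hst
    have hN : st.2.getD j 0 = row.getD j 0 := by rw [h4]; simp
    have hLj : st.1.getD j 0 = last0.getD j 0 := by rw [h3]; simp
    have hjL : j < st.1.length := by omega
    have hjN : j < st.2.length := by omega
    unfold pvRowStep
    by_cases hr : row.getD j 0 ≠ 0
    · rw [if_pos (by rw [hN]; exact hr)]
      refine ⟨by simpa using h1, h2, fun c => ?_, fun c => ?_⟩
      · rw [set_getD _ _ _ _ hjL, hN]
        by_cases hcj : c = j
        · subst hcj; rw [if_pos rfl, if_pos ⟨Nat.lt_succ_self _, hr⟩]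
        · rw [if_neg hcj, h3]
          by_cases hcl : c < j ∧ row.getD c 0 ≠ 0
          · rw [if_pos hcl, if_pos ⟨by omega, hcl.2⟩]
          · rw [if_neg hcl, if_neg (by rintro ⟨a, b⟩; exact hcl ⟨by omega, b⟩)]
      · rw [h4]
        by_cases hcj : c = j
        · subst hcj; rw [if_neg (fun h => hr h.2), if_neg (fun h => hr h.2)]
        · by_cases hcl : c < j ∧ row.getD c 0 = 0
          · rw [if_pos hcl, if_pos ⟨by omega, hcl.2⟩]
          · rw [if_neg hcl, if_neg (by rintro ⟨a, b⟩; exact hcl ⟨by omega, b⟩)]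
    · push_neg at hr
      rw [if_neg (by rw [hN]; simpa using hr)]
      by_cases hl : last0.getD j 0 ≠ 0
      · rw [if_pos (by rw [hLj]; exact hl)]
        refine ⟨h1, by simpa using h2, fun c => ?_, fun c => ?_⟩
        · rw [h3]
          by_cases hcj : c = j
          · subst hcj; rw [if_neg (fun h => h.2 hr), if_neg (fun h => h.2 hr)]
          · by_cases hcl : c < j ∧ row.getD c 0 ≠ 0
            · rw [if_pos hcl, if_pos ⟨by omega, hcl.2⟩]
            · rw [if_neg hcl, if_neg (by rintro ⟨a, b⟩; exact hcl ⟨by omega, b⟩)]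
        · rw [set_getD _ _ _ _ hjN, hLj]
          by_cases hcj : c = j
          · subst hcj; rw [if_pos rfl, if_pos ⟨Nat.lt_succ_self _, hr⟩]
          · rw [if_neg hcj, h4]
            by_cases hcl : c < j ∧ row.getD c 0 = 0
            · rw [if_pos hcl, if_pos ⟨by omega, hcl.2⟩]
            · rw [if_neg hcl, if_neg (by rintro ⟨a, b⟩; exact hcl ⟨by omega, b⟩)]
      · push_neg at hl
        rw [if_neg (by rw [hLj]; simpa using hl)]
        refine ⟨h1, h2, fun c => ?_, fun c => ?_⟩
        · rw [h3]
          by_cases hcj : c = j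
          · subst hcj; rw [if_neg (fun h => h.2 hr), if_neg (fun h => h.2 hr)]
          · by_cases hcl : c < j ∧ row.getD c 0 ≠ 0
            · rw [if_pos hcl, if_pos ⟨by omega, hcl.2⟩]
            · rw [if_neg hcl, if_neg (by rintro ⟨a, b⟩; exact hcl ⟨by omega, b⟩)]
        · rw [h4]
          by_cases hcj : c = j
          · subst hcj; rw [if_neg (fun h => Nat.lt_irrefl _ h.1), if_pos ⟨Nat.lt_succ_self _, hr⟩, hr, hl]
          · by_cases hcl : c < j ∧ row.getD c 0 = 0
            · rw [if_pos hcl, if_pos ⟨by omega, hcl.2⟩]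
            · rw [if_neg hcl, if_neg (by rintro ⟨a, b⟩; exact hcl ⟨by omega, b⟩)]

theorem ext_rows (a b : List Int) (hl : a.length = b.length)
    (h : ∀ cc, cc < a.length → a.getD cc 0 = b.getD cc 0) : a = b := by
  apply List.ext_getElem hl
  intro i h1 h2
  have := h i h1
  rwa [List.getD_eq_getElem a 0 h1, List.getD_eq_getElem b 0 h2] at this

theorem expRow_length (pre : List (List Int)) (w : Nat) (row : List Int) (hw : w ≤ row.length) :
    (expRow pre w row).length = row.length := by
  simp [expRow, lastList]
  omega

theorem expRow_getD (pre : List (List Int)) (w : Nat) (row : List Int) (cc : Nat)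
    (hw : w ≤ row.length) (hcc : cc < row.length) :
    (expRow pre w row).getD cc 0 =
      if cc < w then (if row.getD cc 0 ≠ 0 then row.getD cc 0 else colLast pre cc)
      else row.getD cc 0 := by
  have hlz : (List.zipWith (fun v l => if v ≠ 0 then v else l) row (lastList pre w)).length = w := by
    simp [lastList]; omega
  have hlen : cc < (expRow pre w row).length := by rw [expRow_length pre w row hw]; exact hcc
  rw [List.getD_eq_getElem _ _ hlen]
  unfold expRow at hlen ⊢
  rw [List.getElem_append]
  by_cases hcw : cc < w
  · rw [dif_pos (by omega)]
    rw [List.getElem_zipWith]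
    have h1 : (lastList pre w)[cc]'(by simp [lastList]; omega) = colLast pre cc := by
      simp [lastList]
    rw [h1, List.getD_eq_getElem row 0 hcc, if_pos hcw]
  · rw [dif_neg (by omega), if_neg hcw]
    rw [List.getElem_drop]
    rw [List.getD_eq_getElem row 0 hcc]
    congr 1
    omega

theorem pvStep_eq (w : Nat) (pre : List (List Int)) (acc : List (List Int)) (row : List Int)
    (hw : w ≤ row.length) :
    pvStep w (lastList pre w, acc) row = (lastList (pre ++ [row]) w, acc ++ [expRow pre w row]) := by
  have hL : (lastList pre w).length = w := by simp [lastList]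
  obtain ⟨h1, h2, h3, h4⟩ := innerB w (lastList pre w) row hL hw w (le_refl w)
  unfold pvStep
  refine Prod.ext ?_ ?_
  · apply ext_rows
    · rw [h1, hL]; simp [lastList]
    · intro cc hcc
      have hcw : cc < w := by rw [h1, hL] at hcc; exact hcc
      rw [h3, lastList_getD _ _ _ hcw, lastList_getD _ _ _ hcw, colLast_append_single]
      by_cases hr : row.getD cc 0 ≠ 0
      · rw [if_pos ⟨hcw, hr⟩, if_pos hr]
      · rw [if_neg (by tauto), if_neg hr]
  · show acc ++ [_] = acc ++ [_]
    congr 1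
    refine congrArg (fun x => [x]) ?_
    apply ext_rows
    · rw [h2, expRow_length pre w row hw]
    · intro cc hcc
      have hcc' : cc < row.length := by rwa [h2] at hcc
      rw [h4, expRow_getD pre w row cc hw hcc']
      by_cases hcw : cc < w
      · rw [if_pos hcw, lastList_getD _ _ _ hcw]
        by_cases hr : row.getD cc 0 = 0
        · rw [if_pos ⟨hcw, hr⟩, if_neg (by simpa using hr)]
        · rw [if_neg (by tauto), if_pos hr]
      · rw [if_neg hcw, if_neg (by rintro ⟨a, _⟩; exact hcw a)]

theorem foldB (w : Nat) (rest : List (List Int)) :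
    ∀ (pre acc : List (List Int)), (∀ row ∈ rest, w ≤ row.length) →
    (rest.foldl (pvStep w) (lastList pre w, acc)).2 = acc ++ expOut pre w rest := by
  induction rest with
  | nil => intro pre acc _; simp [expOut]
  | cons row t ih =>
    intro pre acc hrows
    rw [List.foldl_cons, pvStep_eq w pre acc row (hrows row (by simp))]
    rw [ih (pre ++ [row]) (acc ++ [expRow pre w row]) (fun r hr => hrows r (by simp [hr]))]
    simp [expOut]

theorem alt_eq (grid : List (List Int)) (hne : ¬(grid = [] ∨ grid.headI = []))
    (hpre : Pre_extend_down grid) :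
    extend_down_alt grid = expOut [] grid.headI.length grid := by
  unfold extend_down_alt
  rw [if_neg hne]
  have h := foldB grid.headI.length grid [] [] (fun row hr => hpre row hr)
  simp only [List.nil_append] at h
  simpa only [← lastList_nil] using h

theorem expOut_length (w : Nat) (l : List (List Int)) :
    ∀ pre, (expOut pre w l).length = l.length := by
  induction l with
  | nil => intro pre; rfl
  | cons row t ih => intro pre; simp [expOut, ih]

theorem expOut_getD (w : Nat) (l : List (List Int)) :
    ∀ pre x, x < l.length →
      (expOut pre w l).getD x [] = expRow (pre ++ l.take x) w (l.getD x []) := by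
  induction l with
  | nil => intro pre x hx; simp at hx
  | cons row t ih =>
    intro pre x hx
    cases x with
    | zero => simp [expOut, List.getD]
    | succ n =>
      have := ih (pre ++ [row]) n (by simpa using hx)
      simpa [expOut, List.getD] using this

-- ----- A side -----

theorem pvSet2_getD (m : List (List Int)) (r c : Nat) (v : Int) (x : Nat) :
    (pvSet2 m r c v).getD x [] = if x = r then (m.getD r []).set c v else m.getD x [] := by
  unfold pvSet2
  by_cases hxr : x = r
  · subst hxr
    by_cases hx : x < m.length
    · simp [List.getD, List.getElem?_modify, List.getElem?_eq_getElem hx]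
    · simp [List.getD, List.getElem?_modify, List.getElem?_eq_none (by omega : m.length ≤ x)]
  · simp [List.getD, List.getElem?_modify, Ne.symm hxr, hxr]

theorem pvGet2_pvSet2 (m : List (List Int)) (r c : Nat) (v : Int) (x cc : Nat) :
    pvGet2 (pvSet2 m r c v) x cc =
      if x = r ∧ cc = c ∧ c < (m.getD r []).length then v else pvGet2 m x cc := by
  unfold pvGet2
  rw [pvSet2_getD]
  by_cases hxr : x = r
  · subst hxr
    rw [if_pos rfl]
    by_cases hcc : cc = c
    · subst hcc
      by_cases hcl : cc < (m.getD x []).length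
      · have hcl' : cc < (m[x]?.getD []).length := hcl
        rw [if_pos ⟨rfl, rfl, hcl⟩]
        simp [List.getD, List.getElem?_set, hcl']
      · have hcl' : ¬ cc < (m[x]?.getD []).length := hcl
        rw [if_neg (by tauto)]
        simp [List.getD, List.getElem?_set, hcl']
    · rw [if_neg (by tauto)]
      simp [List.getD, List.getElem?_set, Ne.symm hcc]
  · rw [if_neg hxr, if_neg (by tauto)]

theorem pvSet2_shape (g m : List (List Int)) (r c : Nat) (v : Int) (hs : Shape g m) :
    Shape g (pvSet2 m r c v) := by
  obtain ⟨h1, h2⟩ := hs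
  refine ⟨by simpa [pvSet2] using h1, fun x => ?_⟩
  rw [pvSet2_getD]
  have h2' := h2 x
  simp only [List.getD] at h2' ⊢
  by_cases hxr : x = r
  · subst hxr; simp [h2']
  · simp [hxr, h2']

theorem pvWhile_shape (g : List (List Int)) (hh c : Nat) (v : Int) :
    ∀ nr res, Shape g res → Shape g (pvWhile g hh c v res nr) := by
  suffices h : ∀ fuel nr res, hh ≤ nr + fuel → Shape g res →
      Shape g (pvWhile g hh c v res nr) by
    intro nr res hs; exact h hh nr res (by omega) hs
  intro fuel
  induction fuel with
  | zero =>
    intro nr res hb hs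
    rw [pvWhile, dif_neg (by omega)]
    exact hs
  | succ n ih =>
    intro nr res hb hs
    rw [pvWhile]
    split_ifs with h1 h2
    · exact ih (nr + 1) _ (by omega) (pvSet2_shape g res nr c v hs)
    · exact hs
    · exact hs

theorem pvWhile_get2 (g : List (List Int)) (hh c : Nat) (v : Int)
    (Hc : ∀ y, y < hh → c < (g.getD y []).length) :
    ∀ nr res, Shape g res → ∀ x cc,
      (cc = c ∧ nr ≤ x ∧ x < hh ∧ noz g c nr (x + 1) →
        pvGet2 (pvWhile g hh c v res nr) x cc = v) ∧
      (¬(cc = c ∧ nr ≤ x ∧ x < hh ∧ noz g c nr (x + 1)) →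
        pvGet2 (pvWhile g hh c v res nr) x cc = pvGet2 res x cc) := by
  suffices h : ∀ fuel nr res, hh ≤ nr + fuel → Shape g res → ∀ x cc,
      (cc = c ∧ nr ≤ x ∧ x < hh ∧ noz g c nr (x + 1) →
        pvGet2 (pvWhile g hh c v res nr) x cc = v) ∧
      (¬(cc = c ∧ nr ≤ x ∧ x < hh ∧ noz g c nr (x + 1)) →
        pvGet2 (pvWhile g hh c v res nr) x cc = pvGet2 res x cc) by
    intro nr res hs x cc; exact h hh nr res (by omega) hs x cc
  intro fuel
  induction fuel with
  | zero =>
    intro nr res hb hs x cc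
    rw [pvWhile, dif_neg (by omega)]
    exact ⟨fun ⟨_, h2, h3, _⟩ => by omega, fun _ => rfl⟩
  | succ n ih =>
    intro nr res hb hs x cc
    rw [pvWhile]
    split_ifs with h1 h2
    · -- nr < hh, grid cell zero: one write then recurse
      have ihr := ih (nr + 1) (pvSet2 res nr c v) (by omega)
        (pvSet2_shape g res nr c v hs) x cc
      constructor
      · rintro ⟨hcc, hnr, hx, hz⟩
        by_cases hx1 : nr + 1 ≤ x
        · exact ihr.1 ⟨hcc, hx1, hx, fun y hy1 hy2 => hz y (by omega) hy2⟩
        · have hxnr : x = nr := by omega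
          rw [ihr.2 (by rintro ⟨_, h', _, _⟩; omega)]
          rw [pvGet2_pvSet2]
          rw [if_pos ⟨hxnr, hcc, by rw [hs.2 nr]; exact Hc nr h1⟩]
      · intro hn
        have hcond : ¬(cc = c ∧ nr + 1 ≤ x ∧ x < hh ∧ noz g c (nr + 1) (x + 1)) := by
          rintro ⟨hcc, hx1, hx, hz⟩
          exact hn ⟨hcc, by omega, hx, fun y hy1 hy2 => by
            by_cases hy : y = nr
            · subst hy; exact h2
            · exact hz y (by omega) hy2⟩
        rw [ihr.2 hcond, pvGet2_pvSet2]
        rw [if_neg (by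
          rintro ⟨hxnr, hcc, _⟩
          exact hn ⟨hcc, by omega, by omega, fun y hy1 hy2 => by
            have : y = nr := by omega
            subst this; exact h2⟩)]
    · -- nr < hh, grid cell non-zero: stop
      refine ⟨?_, fun _ => rfl⟩
      rintro ⟨hcc, hnr, hx, hz⟩
      exact absurd (hz nr (le_refl nr) (by omega)) h2
    · -- nr ≥ hh
      refine ⟨?_, fun _ => rfl⟩
      rintro ⟨hcc, hnr, hx, hz⟩
      omega

theorem innerFold (g : List (List Int)) (hh w k : Nat)
    (Hw : ∀ y, y < hh → w ≤ (g.getD y []).length) :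
    ∀ j, j ≤ w → ∀ res, Shape g res →
      Shape g ((List.range j).foldl (fun res c =>
          if pvGet2 g k c = 0 then res
          else pvWhile g hh c (pvGet2 g k c) res (k + 1)) res) ∧
      ∀ x cc,
        (cc < j ∧ pvGet2 g k cc ≠ 0 ∧ k + 1 ≤ x ∧ x < hh ∧ noz g cc (k + 1) (x + 1) →
          pvGet2 ((List.range j).foldl (fun res c =>
            if pvGet2 g k c = 0 then res
            else pvWhile g hh c (pvGet2 g k c) res (k + 1)) res) x cc = pvGet2 g k cc) ∧
        (¬(cc < j ∧ pvGet2 g k cc ≠ 0 ∧ k + 1 ≤ x ∧ x < hh ∧ noz g cc (k + 1) (x + 1)) →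
          pvGet2 ((List.range j).foldl (fun res c =>
            if pvGet2 g k c = 0 then res
            else pvWhile g hh c (pvGet2 g k c) res (k + 1)) res) x cc = pvGet2 res x cc) := by
  intro j
  induction j with
  | zero =>
    intro _ res hs
    refine ⟨hs, fun x cc => ⟨fun hc => by omega, fun _ => rfl⟩⟩
  | succ j ih =>
    intro hj res hs
    obtain ⟨ihsh, ihval⟩ := ih (by omega) res hs
    rw [List.range_succ, List.foldl_append, List.foldl_cons, List.foldl_nil]
    by_cases h0 : pvGet2 g k j = 0
    · rw [if_pos h0]
      refine ⟨ihsh, fun x cc => ⟨?_, ?_⟩⟩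
      · rintro ⟨hcj, hne, hkx, hxh, hz⟩
        have hclt : cc < j := by
          rcases Nat.lt_succ_iff_lt_or_eq.mp hcj with h | h
          · exact h
          · exact absurd (h ▸ hne) (by simp [h0])
        exact (ihval x cc).1 ⟨hclt, hne, hkx, hxh, hz⟩
      · intro hn
        exact (ihval x cc).2 (fun ⟨hcj, r⟩ => hn ⟨by omega, r⟩)
    · rw [if_neg h0]
      have Hcj : ∀ y, y < hh → j < (g.getD y []).length :=
        fun y hy => lt_of_lt_of_le (by omega) (Hw y hy)
      refine ⟨pvWhile_shape g hh j (pvGet2 g k j) (k + 1) _ ihsh, fun x cc => ⟨?_, ?_⟩⟩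
      · rintro ⟨hcj, hne, hkx, hxh, hz⟩
        by_cases hccj : cc = j
        · subst hccj
          exact (pvWhile_get2 g hh cc (pvGet2 g k cc) Hcj (k + 1) _ ihsh x cc).1
            ⟨rfl, hkx, hxh, hz⟩
        · rw [(pvWhile_get2 g hh j (pvGet2 g k j) Hcj (k + 1) _ ihsh x cc).2
            (fun ⟨h', _⟩ => hccj h')]
          exact (ihval x cc).1 ⟨by omega, hne, hkx, hxh, hz⟩
      · intro hn
        have hnw : ¬(cc = j ∧ k + 1 ≤ x ∧ x < hh ∧ noz g j (k + 1) (x + 1)) := by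
          rintro ⟨hcj, hkx, hxh, hz⟩
          subst hcj
          exact hn ⟨by omega, h0, hkx, hxh, hz⟩
        rw [(pvWhile_get2 g hh j (pvGet2 g k j) Hcj (k + 1) _ ihsh x cc).2 hnw]
        exact (ihval x cc).2 (fun ⟨hcj, r⟩ => hn ⟨by omega, r⟩)

theorem outerFold (g : List (List Int)) (w : Nat)
    (Hw : ∀ y, y < g.length → w ≤ (g.getD y []).length) :
    ∀ k,
      Shape g ((List.range k).foldl (fun res r =>
          (List.range w).foldl (fun res c =>
            if pvGet2 g r c = 0 then res
            else pvWhile g g.length c (pvGet2 g r c) res (r + 1)) res) g) ∧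
      ∀ x cc,
        (cc < w ∧ x < g.length ∧ Fill g k x cc →
          pvGet2 ((List.range k).foldl (fun res r =>
            (List.range w).foldl (fun res c =>
              if pvGet2 g r c = 0 then res
              else pvWhile g g.length c (pvGet2 g r c) res (r + 1)) res) g) x cc =
            colLast (g.take x) cc) ∧
        (¬(cc < w ∧ x < g.length ∧ Fill g k x cc) →
          pvGet2 ((List.range k).foldl (fun res r =>
            (List.range w).foldl (fun res c =>
              if pvGet2 g r c = 0 then res
              else pvWhile g g.length c (pvGet2 g r c) res (r + 1)) res) g) x cc =
            pvGet2 g x cc) := by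
  intro k
  induction k with
  | zero =>
    refine ⟨⟨rfl, fun _ => rfl⟩, fun x cc => ⟨?_, fun _ => rfl⟩⟩
    rintro ⟨_, _, r, hr, _⟩
    omega
  | succ k ih =>
    obtain ⟨ihsh, ihval⟩ := ih
    rw [List.range_succ, List.foldl_append, List.foldl_cons, List.foldl_nil]
    obtain ⟨insh, inval⟩ := innerFold g g.length w k Hw w (le_refl w) _ ihsh
    refine ⟨insh, fun x cc => ⟨?_, ?_⟩⟩
    · rintro ⟨hcw, hxh, r, hr, hrx, hne, hz⟩
      by_cases hrk : r = k
      · subst hrk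
        rw [(inval x cc).1 ⟨hcw, hne, by omega, hxh, hz⟩]
        rw [colLast_eq g cc r x hrx (fun y h1 h2 => hz y h1 (by omega)), if_pos hne]
      · have hrk' : r < k := by omega
        have hnin : ¬(cc < w ∧ pvGet2 g k cc ≠ 0 ∧ k + 1 ≤ x ∧ x < g.length ∧
            noz g cc (k + 1) (x + 1)) := by
          rintro ⟨_, hkne, hkx, _, _⟩
          exact hkne (hz k (by omega) (by omega))
        rw [(inval x cc).2 hnin]
        exact (ihval x cc).1 ⟨hcw, hxh, r, hrk', hrx, hne, hz⟩
    · intro hn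
      have hnin : ¬(cc < w ∧ pvGet2 g k cc ≠ 0 ∧ k + 1 ≤ x ∧ x < g.length ∧
          noz g cc (k + 1) (x + 1)) := by
        rintro ⟨hcw, hkne, hkx, hxh, hz⟩
        exact hn ⟨hcw, hxh, k, by omega, by omega, hkne, hz⟩
      rw [(inval x cc).2 hnin]
      exact (ihval x cc).2 (fun ⟨hcw, hxh, r, hr, rest⟩ => hn ⟨hcw, hxh, r, by omega, rest⟩)

theorem ext_grid (a b : List (List Int)) (hl : a.length = b.length)
    (h : ∀ x, x < a.length → a.getD x [] = b.getD x []) : a = b := by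
  apply List.ext_getElem hl
  intro i h1 h2
  have := h i h1
  rwa [List.getD_eq_getElem a [] h1, List.getD_eq_getElem b [] h2] at this

theorem a_eq (grid : List (List Int)) (hne : ¬(grid = [] ∨ grid.headI = []))
    (hpre : Pre_extend_down grid) :
    extend_down grid = expOut [] grid.headI.length grid := by
  unfold extend_down
  rw [if_neg hne]
  have Hw : ∀ y, y < grid.length → grid.headI.length ≤ (grid.getD y []).length := by
    intro y hy
    have := hpre grid[y] (grid.getElem_mem hy)
    rwa [List.getD_eq_getElem _ _ hy]
  obtain ⟨hsh, hval⟩ := outerFold grid grid.headI.length Hw grid.length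
  show (List.range grid.length).foldl _ grid = _
  apply ext_grid
  · rw [hsh.1, expOut_length]
  · intro x hx
    have hxg : x < grid.length := hsh.1 ▸ hx
    rw [expOut_getD grid.headI.length grid [] x hxg, List.nil_append]
    apply ext_rows
    · rw [hsh.2 x, expRow_length _ _ _ (Hw x hxg)]
    · intro cc hcc
      have hcc' : cc < (grid.getD x []).length := by rw [← hsh.2 x]; exact hcc
      rw [expRow_getD _ _ _ _ (Hw x hxg) hcc']
      have hrow : (grid.getD x []).getD cc 0 = pvGet2 grid x cc := rfl
      rw [hrow]
      show pvGet2 _ x cc = _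
      by_cases hcw : cc < grid.headI.length
      · rw [if_pos hcw]
        by_cases h0 : pvGet2 grid x cc = 0
        · rw [if_neg (by simpa using h0)]
          rcases colLast_spec grid cc x with ⟨hz0, hzz⟩ | ⟨r, hrx, hne', hz, he⟩
          · rw [(hval x cc).2 (by
              rintro ⟨_, _, r, hr, hrx, hne', _⟩
              exact hne' (hzz r (by omega) hrx))]
            rw [h0, hz0]
          · refine ((hval x cc).1 ⟨hcw, hxg, r, by omega, hrx, hne', ?_⟩)
            intro y h1 h2
            by_cases hyx : y = x
            · subst hyx; exact h0
            · exact hz y h1 (by omega)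
        · rw [if_pos (by simpa using h0)]
          refine (hval x cc).2 (by
            rintro ⟨_, _, r, hr, hrx, hne', hz⟩
            exact h0 (hz x (by omega) (by omega)))
      · rw [if_neg hcw]
        exact (hval x cc).2 (by rintro ⟨h', _⟩; exact hcw h')

-- ===== VERDICT (by name: the statement is the Claim_ definition above) =====
theorem extend_down_spec : Claim_equal_extend_down := by
  intro grid _ hpre
  unfold Spec_extend_down
  by_cases hg : grid = [] ∨ grid.headI = []
  · unfold extend_down extend_down_alt
    simp [hg]
  · rw [a_eq grid hg hpre, alt_eq grid hg hpre]
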